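-- pv_equiv track=rewrite | github.com/cappe987/aoc-2021 | 10/main.py | syntax_check
-- ===== SOURCE A (Python) =====
-- def syntax_check(line, complete):
--   while line and line[0] in ['(', '[', '{', '<']:
--     if line[0] == '(':
--       line = syntax_check(line[1:], complete)
--       if not line:
--         complete.append(')')
--       elif line[0] != ')':
--         raise KeyError(line[0])
--       else:
--         line = line[1:]
--     elif line[0] == '[':
--       line = syntax_check(line[1:], complete)
--       if not line:
--         complete.append(']')
--       elif line[0] != ']':
--         raise KeyError(line[0])
--       else:
--         line = line[1:]
--     elif line[0] == '{':
--       line = syntax_check(line[1:], complete)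
--       if not line:
--         complete.append('}')
--       elif line[0] != '}':
--         raise KeyError(line[0])
--       else:
--         line = line[1:]
--     elif line[0] == '<':
--       line = syntax_check(line[1:], complete)
--       if not line:
--         complete.append('>')
--       elif line[0] != '>':
--         raise KeyError(line[0])
--       else:
--         line = line[1:]
--
--   return line
-- ===== SOURCE B (Python) =====
-- def syntax_check(line, complete):
--     pairs = {'(': ')', '[': ']', '{': '}', '<': '>'}
--     stack = []
--     for i, c in enumerate(line):
--         if c in pairs:
--             stack.append(pairs[c])
--         elif not stack:
--             return line[i:]
--         elif c == stack[-1]: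
--             stack.pop()
--         else:
--             raise KeyError(c)
--     while stack:
--         complete.append(stack.pop())
--     return ''
-- ===== Notes on version B (the rewrite author's own statement) =====
-- stated objective: alternative
-- what changed: Replaced the recursive descent that re-slices the string (line[1:]) at every step by a single iterative left-to-right pass keeping an explicit stack of expected closers.
import Mathlib
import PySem

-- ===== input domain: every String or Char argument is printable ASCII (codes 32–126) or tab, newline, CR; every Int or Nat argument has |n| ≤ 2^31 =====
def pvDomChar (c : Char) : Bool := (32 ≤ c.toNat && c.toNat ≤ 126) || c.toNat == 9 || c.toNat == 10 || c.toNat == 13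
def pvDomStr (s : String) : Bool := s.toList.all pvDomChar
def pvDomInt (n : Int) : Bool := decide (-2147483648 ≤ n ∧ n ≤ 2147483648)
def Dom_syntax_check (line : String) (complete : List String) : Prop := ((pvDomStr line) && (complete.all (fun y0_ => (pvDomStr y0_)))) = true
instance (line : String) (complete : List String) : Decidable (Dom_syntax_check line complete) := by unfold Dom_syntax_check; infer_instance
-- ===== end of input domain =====

-- B is a single-pass explicit-stack rewrite of A's recursive slicing parser; the equivalence proved
-- here is about the RETURN value only (both Pythons also append the same closers to `complete`).

-- ===== PORT A =====
-- A's while-loop-with-recursion, fueled for termination (fuel = length+1 always suffices,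
-- since every recursive call is on a strictly shorter list); `none` marks Python's KeyError,
-- excluded by Pre_. The appends to `complete` do not affect the return value and are not modelled.
def pvSynA : Nat → List Char → Option (List Char)
  | 0, _ => none
  | _ + 1, [] => some []
  | f + 1, c :: rest =>
    if c = '(' ∨ c = '[' ∨ c = '{' ∨ c = '<' then
      if c = '(' then
        match pvSynA f rest with
        | none => none
        | some [] => some []                         -- line exhausted: complete.append(')')
        | some (d :: r) => if d ≠ ')' then none else pvSynA f r
      else if c = '[' then
        match pvSynA f rest with
        | none => none
        | some [] => some []
        | some (d :: r) => if d ≠ ']' then none else pvSynA f r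
      else if c = '{' then
        match pvSynA f rest with
        | none => none
        | some [] => some []
        | some (d :: r) => if d ≠ '}' then none else pvSynA f r
      else
        match pvSynA f rest with
        | none => none
        | some [] => some []
        | some (d :: r) => if d ≠ '>' then none else pvSynA f r
    else some (c :: rest)

def syntax_check (line : String) (complete : List String) : String :=
  match pvSynA (line.toList.length + 1) line.toList with
  | some l => String.mk l
  | none => ""          -- Python raises KeyError here; excluded by Pre_

-- ===== PORT B =====
-- Source B's single pass: push the expected closer for each opener, pop on the matching closer,
-- stop (returning the remaining suffix) at a non-opener with empty stack; none = KeyError.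
def pvCloser (c : Char) : Char :=
  if c = '(' then ')' else if c = '[' then ']' else if c = '{' then '}' else '>'

def pvSynB : List Char → List Char → Option (List Char)
  | [], _ => some []                                  -- while stack: complete.append(stack.pop())
  | c :: rest, stack =>
    if c = '(' ∨ c = '[' ∨ c = '{' ∨ c = '<' then
      pvSynB rest (pvCloser c :: stack)
    else
      match stack with
      | [] => some (c :: rest)
      | e :: s => if c = e then pvSynB rest s else none

def syntax_check_alt (line : String) (complete : List String) : String :=
  match pvSynB line.toList [] with
  | some l => String.mk l
  | none => ""          -- Python raises KeyError here; excluded by Pre_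

-- ===== PRECONDITION & SPEC =====
-- Pre_ excludes exactly the corrupted lines, on which Python A raises KeyError: those where some
-- character is read while an open bracket is still unmatched and is neither an opener nor that
-- bracket's closer. This is the standard bracket-validity condition; like any bracket-matching
-- condition it is stated with a stack of pending closers (it has no stack-free closed form).
-- pvOk returns only a Bool and is used by neither port.
def pvOk : List Char → List Char → Bool
  | [], _ => true
  | c :: rest, stack =>
    if c = '(' ∨ c = '[' ∨ c = '{' ∨ c = '<' then
      pvOk rest (pvCloser c :: stack)
    else
      match stack with
      | [] => true
      | e :: s => if c = e then pvOk rest s else false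

def Pre_syntax_check (line : String) (complete : List String) : Prop :=
  pvOk line.toList [] = true
instance (line : String) (complete : List String) : Decidable (Pre_syntax_check line complete) := by
  unfold Pre_syntax_check; infer_instance

def pvWitness_syntax_check : String × List String := ("([{}])<>(", [")"])

def Spec_syntax_check (line : String) (complete : List String) (out : String) : Prop := out = syntax_check_alt line complete
instance (line : String) (complete : List String) (out : String) : Decidable (Spec_syntax_check line complete out) := by unfold Spec_syntax_check; infer_instance

-- ===== CLAIM (what is proved, stated in full; the proofs are below) =====
def Claim_equal_syntax_check : Prop := ∀ (line : String) (complete : List String), Dom_syntax_check line complete → Pre_syntax_check line complete → Spec_syntax_check line complete (syntax_check line complete)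

-- ===== LEMMAS AND PROOFS =====

-- A's result is never longer than its input.
theorem pvSynA_length {f : Nat} : ∀ {l l' : List Char}, pvSynA f l = some l' → l'.length ≤ l.length := by
  induction f with
  | zero => intro l l' h; simp [pvSynA] at h
  | succ f ih =>
    intro l l' h
    match l with
    | [] => simp [pvSynA] at h; simp [h]
    | c :: rest =>
      by_cases hc : c = '(' ∨ c = '[' ∨ c = '{' ∨ c = '<'
      · simp only [pvSynA, if_pos hc] at h
        -- four identical branches
        have key : ∀ z : Char,
            (match pvSynA f rest with
              | none => none
              | some [] => some []
              | some (d :: r) => if d ≠ z then none else pvSynA f r) = some l' →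
            l'.length ≤ (c :: rest).length := by
          intro z hz
          cases hA : pvSynA f rest with
          | none => rw [hA] at hz; simp at hz
          | some m =>
            rw [hA] at hz
            match m with
            | [] => simp at hz; simp [hz]
            | d :: r =>
              simp only at hz
              split_ifs at hz with hd
              · have h1 := ih hA
                have h2 := ih hz
                simp at h1
                simp only [List.length_cons]
                omega
        split_ifs at h with h1 h2 h3
        · exact key ')' h
        · exact key ']' h
        · exact key '}' h
        · exact key '>' h
      · simp only [pvSynA, if_neg hc] at h
        simp only [Option.some.injEq] at h
        subst h
        simp
-- Main invariant: B's stack pass computes A's recursion followed by the pending pops.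
theorem pvSyn_agree {f : Nat} : ∀ {l : List Char}, l.length < f → ∀ (stack : List Char),
    pvSynB l stack =
      (match pvSynA f l with
        | none => none
        | some [] => some []
        | some (d :: r) =>
          match stack with
          | [] => some (d :: r)
          | e :: s => if d = e then pvSynB r s else none) := by
  induction f with
  | zero => intro l h; omega
  | succ f ih =>
    intro l hlen stack
    match l with
    | [] => simp [pvSynA, pvSynB]
    | c :: rest =>
      by_cases hc : c = '(' ∨ c = '[' ∨ c = '{' ∨ c = '<'
      · simp only [pvSynB, pvSynA, if_pos hc]
        have hrest : rest.length < f := by simp at hlen; omega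
        rw [ih hrest (pvCloser c :: stack)]
        have key : ∀ z : Char, pvCloser c = z →
            (match pvSynA f rest with
              | none => none
              | some [] => some []
              | some (d :: r) =>
                match pvCloser c :: stack with
                | [] => some (d :: r)
                | e :: s => if d = e then pvSynB r s else none) =
            (match
              (match pvSynA f rest with
                | none => none
                | some [] => some []
                | some (d :: r) => if d ≠ z then none else pvSynA f r) with
              | none => none
              | some [] => some []
              | some (d :: r) =>
                match stack with
                | [] => some (d :: r)
                | e :: s => if d = e then pvSynB r s else none) := by
          intro z hz
          subst hz
          cases hA : pvSynA f rest with
          | none => simp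
          | some m =>
            match m with
            | [] => simp
            | d :: r =>
              simp only
              by_cases hd : d = pvCloser c
              · subst hd
                have hr : r.length < f := by
                  have := pvSynA_length hA
                  simp at this; omega
                rw [ih hr stack]
                simp
              · simp [hd]
        rcases hc with h1 | h1 | h1 | h1 <;> subst h1
        · rw [key ')' rfl]; simp
        · rw [key ']' rfl]; simp
        · rw [key '}' rfl]; simp
        · rw [key '>' rfl]; simp
      · simp only [pvSynB, pvSynA, if_neg hc]

theorem pvSynB_eq_pvSynA (l : List Char) : pvSynB l [] = pvSynA (l.length + 1) l := by
  rw [pvSyn_agree (f := l.length + 1) (by omega) []]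
  cases h : pvSynA (l.length + 1) l with
  | none => rfl
  | some m => match m with
    | [] => rfl
    | d :: r => rfl

-- ===== VERDICT (by name: the statement is the Claim_ definition above) =====
theorem syntax_check_spec : Claim_equal_syntax_check := by
  intro line complete _ _
  unfold Spec_syntax_check syntax_check syntax_check_alt
  rw [pvSynB_eq_pvSynA]
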